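-- pv_equiv track=rewrite | github.com/dmitriyvechorko/BSUIR | sem4/AOIS/lab3/mc_cluskey_minimization.py | can_be_removed
-- ===== SOURCE A (Python) =====
-- from typing import Tuple, List
--
-- def can_be_removed(mc_cluskey_matrix: List[List[str]], implicate_index: int) -> bool:
--     for column_index in range(len(mc_cluskey_matrix[0])):
--         if mc_cluskey_matrix[implicate_index][column_index] != "+":
--             continue
--         intersection_amount = 0
--         for string_index in range(len(mc_cluskey_matrix)):
--             if string_index == implicate_index:
--                 continue
--             if mc_cluskey_matrix[string_index][column_index] == "+":
--                 intersection_amount += 1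
--         if intersection_amount == 0:
--             return False
--     return True
-- ===== SOURCE B (Python) =====
-- from typing import List
--
--
-- def can_be_removed(mc_cluskey_matrix: List[List[str]], implicate_index: int) -> bool:
--     width = len(mc_cluskey_matrix[0])
--     # one pass over the whole matrix: how many rows cover each column
--     coverage = {}
--     for row in mc_cluskey_matrix:
--         for column in range(width):
--             if row[column] == "+":
--                 coverage[column] = coverage.get(column, 0) + 1
--     # second pass over the target row only: a column it covers with total
--     # coverage 1 is covered by this implicant alone
--     target_row = mc_cluskey_matrix[implicate_index]
--     for column in range(width):
--         if target_row[column] == "+" and coverage.get(column, 0) == 1: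
--             return False
--     return True
-- ===== Notes on version B (the rewrite author's own statement) =====
-- stated objective: alternative
-- what changed: B precomputes a column-coverage counter for the whole matrix in one sweep and then scans only the target row against it, instead of A's per-'+'-column rescan of all other rows with an early return.
-- intended difference: For a negative implicate_index (Python wraparound) A's self-exclusion test 'string_index == implicate_index' never fires, so A counts the target row itself and always returns True, while B correctly treats the wrapped row as the target and returns False when some of its '+'-columns is covered by no other row; B's value is the intended uniqueness check. — e.g. on can_be_removed([["+"]], -1): A returns true, B returns false
-- outside the precondition, e.g. on can_be_removed([['+', 'x'], ['+']], 0): A returns True, B raises IndexError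
import Mathlib
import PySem

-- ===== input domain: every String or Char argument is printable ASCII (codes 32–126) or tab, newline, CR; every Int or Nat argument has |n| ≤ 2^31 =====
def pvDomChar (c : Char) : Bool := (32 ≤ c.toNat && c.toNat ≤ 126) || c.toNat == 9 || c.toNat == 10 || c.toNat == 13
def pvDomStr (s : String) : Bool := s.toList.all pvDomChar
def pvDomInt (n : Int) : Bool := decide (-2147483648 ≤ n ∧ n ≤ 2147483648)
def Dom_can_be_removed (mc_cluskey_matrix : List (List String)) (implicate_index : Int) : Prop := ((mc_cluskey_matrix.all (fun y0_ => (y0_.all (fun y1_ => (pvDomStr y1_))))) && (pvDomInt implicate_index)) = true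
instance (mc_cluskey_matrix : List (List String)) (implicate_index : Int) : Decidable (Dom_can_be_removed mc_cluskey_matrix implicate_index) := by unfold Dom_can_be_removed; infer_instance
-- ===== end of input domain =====

-- B: precompute a column-coverage counter in one sweep, then scan only the target row (alternative decomposition, same cost).

-- ===== PORT A =====
-- inner loop of A: intersection_amount for one column
def canA_amount (m : List (List String)) (i c : Int) : Int :=
  (PySem.List.pyRange 0 (m.length : Int) 1).foldl
    (fun acc s =>
      if s == i then acc
      else if PySem.List.pyGetD (PySem.List.pyGetD m s []) c "" == "+" then acc + 1 else acc)
    0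

-- outer loop of A over the column indices, with the early `return False`
def canA_loop (m : List (List String)) (i : Int) : List Int → Bool
  | [] => true
  | c :: rest =>
    if ¬ (PySem.List.pyGetD (PySem.List.pyGetD m i []) c "" == "+") then canA_loop m i rest
    else if canA_amount m i c == 0 then false
    else canA_loop m i rest

def can_be_removed (mc_cluskey_matrix : List (List String)) (implicate_index : Int) : Bool :=
  canA_loop mc_cluskey_matrix implicate_index
    (PySem.List.pyRange 0 (((PySem.List.pyGetD mc_cluskey_matrix 0 []).length : Int)) 1)

-- ===== PORT B =====
-- B's final loop over the target row, with the early `return False`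
def canB_loop (target : List String) (coverage : PySem.Dict Int Int) : List Int → Bool
  | [] => true
  | c :: rest =>
    if PySem.List.pyGetD target c "" == "+" && coverage.getD c 0 == 1 then false
    else canB_loop target coverage rest

def can_be_removed_alt (mc_cluskey_matrix : List (List String)) (implicate_index : Int) : Bool :=
  let width : Int := ((PySem.List.pyGetD mc_cluskey_matrix 0 []).length : Int)
  let coverage : PySem.Dict Int Int :=
    mc_cluskey_matrix.foldl
      (fun d row =>
        (PySem.List.pyRange 0 width 1).foldl
          (fun d c =>
            if PySem.List.pyGetD row c "" == "+" then d.insert c (d.getD c 0 + 1) else d)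
          d)
      PySem.Dict.empty
  let target := PySem.List.pyGetD mc_cluskey_matrix implicate_index []
  canB_loop target coverage (PySem.List.pyRange 0 width 1)

-- ===== PRECONDITION & SPEC =====
-- Pre_ excludes: empty matrices and implicate_index out of Python's index range (A raises IndexError),
-- and ragged matrices whose rows are shorter than row 0 (A raises IndexError unless an early return
-- happens first; B's single full sweep raises there) — see claim.json "cites".
def Pre_can_be_removed (mc_cluskey_matrix : List (List String)) (implicate_index : Int) : Prop :=
  mc_cluskey_matrix ≠ [] ∧
  (∀ row ∈ mc_cluskey_matrix, (mc_cluskey_matrix.headD []).length ≤ row.length) ∧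
  (-(mc_cluskey_matrix.length : Int) ≤ implicate_index ∧ implicate_index < (mc_cluskey_matrix.length : Int))
instance (mc_cluskey_matrix : List (List String)) (implicate_index : Int) : Decidable (Pre_can_be_removed mc_cluskey_matrix implicate_index) := by unfold Pre_can_be_removed; infer_instance

def pvWitness_can_be_removed : List (List String) × Int := ([["+", "-"], ["-", "+"]], 0)

-- For negative implicate_index (Python wraparound) A's self-exclusion test `string_index == implicate_index`
-- never fires, so A counts the target row itself and always returns True, while B treats the wrapped row as
-- the target and returns False when one of its '+'-columns is covered by no other row; B's value is the
-- intended uniqueness check.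
def D_can_be_removed (mc_cluskey_matrix : List (List String)) (implicate_index : Int) : Prop :=
  implicate_index < 0 ∧
  ∃ c < (mc_cluskey_matrix.headD []).length,
    ((mc_cluskey_matrix.getD ((mc_cluskey_matrix.length : Int) + implicate_index).toNat []).getD c "") = "+" ∧
    mc_cluskey_matrix.countP (fun row => row.getD c "" == "+") = 1
instance (mc_cluskey_matrix : List (List String)) (implicate_index : Int) : Decidable (D_can_be_removed mc_cluskey_matrix implicate_index) := by unfold D_can_be_removed; infer_instance

def Spec_can_be_removed (mc_cluskey_matrix : List (List String)) (implicate_index : Int) (out : Bool) : Prop := ¬ D_can_be_removed mc_cluskey_matrix implicate_index → out = can_be_removed_alt mc_cluskey_matrix implicate_index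
instance (mc_cluskey_matrix : List (List String)) (implicate_index : Int) (out : Bool) : Decidable (Spec_can_be_removed mc_cluskey_matrix implicate_index out) := by unfold Spec_can_be_removed; infer_instance

def pvDiffWitness_can_be_removed : List (List String) × Int := ([["+"]], -1)
def pvDiffWitnessOut_can_be_removed : Bool × Bool := (true, false)

-- ===== CLAIM (what is proved, stated in full; the proofs are below) =====
def Claim_unchanged_can_be_removed : Prop := ∀ (mc_cluskey_matrix : List (List String)) (implicate_index : Int), Dom_can_be_removed mc_cluskey_matrix implicate_index → Pre_can_be_removed mc_cluskey_matrix implicate_index → Spec_can_be_removed mc_cluskey_matrix implicate_index (can_be_removed mc_cluskey_matrix implicate_index)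
def Claim_changed_can_be_removed : Prop := Dom_can_be_removed (pvDiffWitness_can_be_removed.1) (pvDiffWitness_can_be_removed.2) ∧ Pre_can_be_removed (pvDiffWitness_can_be_removed.1) (pvDiffWitness_can_be_removed.2) ∧ D_can_be_removed (pvDiffWitness_can_be_removed.1) (pvDiffWitness_can_be_removed.2) ∧ can_be_removed (pvDiffWitness_can_be_removed.1) (pvDiffWitness_can_be_removed.2) = pvDiffWitnessOut_can_be_removed.1 ∧ can_be_removed_alt (pvDiffWitness_can_be_removed.1) (pvDiffWitness_can_be_removed.2) = pvDiffWitnessOut_can_be_removed.2 ∧ pvDiffWitnessOut_can_be_removed.1 ≠ pvDiffWitnessOut_can_be_removed.2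
def Claim_exact_can_be_removed : Prop := ∀ (mc_cluskey_matrix : List (List String)) (implicate_index : Int), Dom_can_be_removed mc_cluskey_matrix implicate_index → Pre_can_be_removed mc_cluskey_matrix implicate_index → D_can_be_removed mc_cluskey_matrix implicate_index → can_be_removed mc_cluskey_matrix implicate_index ≠ can_be_removed_alt mc_cluskey_matrix implicate_index

-- ===== LEMMAS AND PROOFS =====

theorem sum_skip (p : Int → Int) (i : Int) (l : List Int) (hnd : l.Nodup) :
    (l.map (fun s => if s == i then 0 else p s)).sum
      = (l.map p).sum - (if i ∈ l then p i else 0) := by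
  induction l with
  | nil => simp
  | cons a l ih =>
    simp only [List.nodup_cons] at hnd
    have ihl := ih hnd.2
    simp only [beq_iff_eq] at ihl
    simp only [List.map_cons, List.sum_cons, List.mem_cons, beq_iff_eq]
    by_cases ha : a = i
    · subst ha
      have hmap : (l.map (fun s => if s = a then 0 else p s)) = l.map p :=
        List.map_congr_left (fun x hx => by
          have hxa : x ≠ a := fun h => hnd.1 (h ▸ hx)
          simp [hxa])
      simp [hmap, hnd.1]
    · by_cases hi : i ∈ l
      · simp [ha, hi, Ne.symm ha, ihl]; ring
      · simp [ha, hi, Ne.symm ha, ihl]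

theorem foldl_amount (m : List (List String)) (i c : Int) (l : List Int) (a : Int) :
    l.foldl (fun acc s =>
      if s == i then acc
      else if PySem.List.pyGetD (PySem.List.pyGetD m s []) c "" == "+" then acc + 1 else acc) a
    = a + (l.map (fun s =>
        if s == i then 0
        else if PySem.List.pyGetD (PySem.List.pyGetD m s []) c "" == "+" then 1 else 0)).sum := by
  induction l generalizing a with
  | nil => simp
  | cons s l ih =>
    simp only [List.foldl_cons, List.map_cons, List.sum_cons, ih]
    by_cases h1 : (s == i) = true <;> by_cases h2 : (PySem.List.pyGetD (PySem.List.pyGetD m s []) c "" == "+") = true <;>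
      simp [h1, h2] <;> ring

theorem canA_amount_eq' (m : List (List String)) (i c : Int) :
    (PySem.List.pyRange 0 (m.length : Int) 1).foldl
      (fun acc s =>
        if s == i then acc
        else if PySem.List.pyGetD (PySem.List.pyGetD m s []) c "" == "+" then acc + 1 else acc) 0
    = (m.countP (fun row => PySem.List.pyGetD row c "" == "+") : Int)
      - (if 0 ≤ i ∧ i < (m.length : Int) ∧ PySem.List.pyGetD (PySem.List.pyGetD m i []) c "" == "+"
         then 1 else 0) := by
  rw [foldl_amount,
    sum_skip (fun s => if PySem.List.pyGetD (PySem.List.pyGetD m s []) c "" == "+" then 1 else 0) i _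
      (PySem.List.nodup_pyRange_one 0 (m.length : Int))]
  have hmap : (PySem.List.pyRange 0 (m.length : Int) 1).map
      (fun s => if PySem.List.pyGetD (PySem.List.pyGetD m s []) c "" == "+" then (1:Int) else 0)
      = (((PySem.List.pyRange 0 (m.length : Int) 1).map (fun s => PySem.List.pyGetD m s [])).map
          (fun row => if PySem.List.pyGetD row c "" == "+" then (1:Int) else 0)) := by
    rw [List.map_map]; rfl
  rw [hmap]
  have hlen : (m.length : Int) = PySem.List.len m := by simp [PySem.List.len]
  rw [hlen, PySem.List.map_pyGetD_pyRange_zero m []]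
  rw [PySem.List.sum_map_ite_one_zero (fun row => PySem.List.pyGetD row c "" == "+") m]
  have hmem : (i ∈ PySem.List.pyRange 0 (PySem.List.len m) 1) ↔ (0 ≤ i ∧ i < (m.length : Int)) := by
    rw [PySem.List.mem_pyRange_one]; simp [PySem.List.len]
  by_cases h : 0 ≤ i ∧ i < (m.length : Int)
  · by_cases h2 : (PySem.List.pyGetD (PySem.List.pyGetD m i []) c "" == "+") = true <;>
      simp [hmem, h, h2]
  · have hno : ¬(0 ≤ i ∧ i < (m.length:Int) ∧ PySem.List.pyGetD (PySem.List.pyGetD m i []) c "" = "+") :=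
      fun ⟨h0, h1, _⟩ => h ⟨h0, h1⟩
    simp [h, hno]

theorem cov_inner (row : List String) (c : Int) (cs : List Int) (hnd : cs.Nodup) (d : PySem.Dict Int Int) :
    ((cs.foldl (fun d c' =>
        if PySem.List.pyGetD row c' "" == "+" then d.insert c' (d.getD c' 0 + 1) else d) d).getD c 0)
    = d.getD c 0 + (if c ∈ cs ∧ PySem.List.pyGetD row c "" == "+" then 1 else 0) := by
  induction cs generalizing d with
  | nil => simp
  | cons c' cs ih =>
    simp only [List.nodup_cons] at hnd
    simp only [List.foldl_cons, List.mem_cons]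
    by_cases hp : (PySem.List.pyGetD row c' "" == "+") = true
    · rw [if_pos hp, ih hnd.2]
      rw [PySem.Dict.getD_insert]
      by_cases hc : c = c'
      · subst hc
        have : c ∉ cs := hnd.1
        simp [this, hp]
      · simp [hc]
    · rw [if_neg hp, ih hnd.2]
      by_cases hc : c = c'
      · subst hc
        have : c ∉ cs := hnd.1
        simp [this, hp]
      · simp [hc]

theorem cov_outer (w c : Int) (rows : List (List String)) (d : PySem.Dict Int Int) :
    ((rows.foldl (fun d row =>
        (PySem.List.pyRange 0 w 1).foldl (fun d c' =>
          if PySem.List.pyGetD row c' "" == "+" then d.insert c' (d.getD c' 0 + 1) else d) d) d).getD c 0)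
    = d.getD c 0 + (if c ∈ PySem.List.pyRange 0 w 1
        then (rows.countP (fun row => PySem.List.pyGetD row c "" == "+") : Int) else 0) := by
  induction rows generalizing d with
  | nil => simp
  | cons row rows ih =>
    simp only [List.foldl_cons, ih, cov_inner row c _ (PySem.List.nodup_pyRange_one 0 w),
      List.countP_cons]
    by_cases hm : c ∈ PySem.List.pyRange 0 w 1
    · by_cases hp : (PySem.List.pyGetD row c "" == "+") = true <;> simp [hm, hp] <;> push_cast <;> ring
    · simp [hm]




theorem canA_loop_eq_all (m : List (List String)) (i : Int) (cs : List Int) :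
    canA_loop m i cs = cs.all (fun c =>
      !(PySem.List.pyGetD (PySem.List.pyGetD m i []) c "" == "+" && canA_amount m i c == 0)) := by
  induction cs with
  | nil => rfl
  | cons c rest ih =>
    simp only [canA_loop, List.all_cons, ih]
    by_cases h1 : (PySem.List.pyGetD (PySem.List.pyGetD m i []) c "" == "+") = true <;>
      by_cases h2 : (canA_amount m i c == 0) = true <;> simp [h1, h2]

theorem canB_loop_eq_all (t : List String) (d : PySem.Dict Int Int) (cs : List Int) :
    canB_loop t d cs = cs.all (fun c => !(PySem.List.pyGetD t c "" == "+" && d.getD c 0 == 1)) := by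
  induction cs with
  | nil => rfl
  | cons c rest ih =>
    simp only [canB_loop, List.all_cons, ih]
    by_cases h1 : (PySem.List.pyGetD t c "" == "+" && d.getD c 0 == 1) = true <;> simp [h1]

theorem all_congr_mem {α : Type} (l : List α) (f g : α → Bool) (h : ∀ x ∈ l, f x = g x) :
    l.all f = l.all g := by
  induction l with
  | nil => rfl
  | cons a l ih =>
    simp only [List.all_cons, h a (List.mem_cons_self), ih (fun x hx => h x (List.mem_cons_of_mem a hx))]

theorem target_neg (m : List (List String)) (i : Int) (hlo : -(m.length : Int) ≤ i) (hneg : i < 0) :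
    PySem.List.pyGetD m i [] = m.getD ((m.length : Int) + i).toNat [] := by
  have hk1 : 0 < (-i).toNat := by omega
  have hk2 : (-i).toNat ≤ m.length := by omega
  have hi : i = -(((-i).toNat : Nat) : Int) := by omega
  rw [hi, PySem.List.pyGetD_neg_natCast m (-i).toNat [] hk1 hk2]
  have hidx : ((m.length : Int) + -(((-i).toNat : Nat) : Int)).toNat = m.length - (-i).toNat := by omega
  rw [hidx, List.getD_eq_getElem m [] (by omega)]



theorem per_column (m : List (List String)) (i : Int)
    (hlo : -(m.length : Int) ≤ i) (hhi : i < (m.length : Int))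
    (hnd : ¬ D_can_be_removed m i) (c : Int)
    (hc : c ∈ PySem.List.pyRange 0 (((PySem.List.pyGetD m 0 []).length : Int)) 1) :
    (!(PySem.List.pyGetD (PySem.List.pyGetD m i []) c "" == "+" && canA_amount m i c == 0))
    = (!(PySem.List.pyGetD (PySem.List.pyGetD m i []) c "" == "+"
        && ((m.foldl (fun d row =>
            (PySem.List.pyRange 0 (((PySem.List.pyGetD m 0 []).length : Int)) 1).foldl
              (fun d c' => if PySem.List.pyGetD row c' "" == "+" then d.insert c' (d.getD c' 0 + 1) else d) d)
          (PySem.Dict.empty : PySem.Dict Int Int)).getD c 0) == 1)) := by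
  have hcb := PySem.List.mem_pyRange_one.mp hc
  rw [cov_outer (((PySem.List.pyGetD m 0 []).length : Int)) c m PySem.Dict.empty, PySem.Dict.getD_empty, if_pos hc]
  by_cases hplus : (PySem.List.pyGetD (PySem.List.pyGetD m i []) c "" == "+") = true
  · have hamt : canA_amount m i c =
        (m.countP (fun row => PySem.List.pyGetD row c "" == "+") : Int)
        - (if 0 ≤ i ∧ i < (m.length : Int) ∧ PySem.List.pyGetD (PySem.List.pyGetD m i []) c "" == "+"
           then 1 else 0) := canA_amount_eq' m i c
    have htm : PySem.List.pyGetD m i [] ∈ m := PySem.List.pyGetD_mem m [] (by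
      constructor <;> omega)
    have hcnt : 0 < m.countP (fun row => PySem.List.pyGetD row c "" == "+") :=
      List.countP_pos_iff.mpr ⟨_, htm, hplus⟩
    by_cases hi0 : 0 ≤ i
    · rw [hamt, if_pos ⟨hi0, hhi, hplus⟩]
      simp only [hplus, Bool.true_and]
      congr 1
      rw [Bool.eq_iff_iff]
      simp only [beq_iff_eq]
      omega
    · have hnint : ¬(0 ≤ i ∧ i < (m.length : Int) ∧
          PySem.List.pyGetD (PySem.List.pyGetD m i []) c "" == "+") := fun h => hi0 h.1
      rw [hamt, if_neg hnint]
      simp only [hplus, Bool.true_and, sub_zero]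
      have hneg : i < 0 := by omega
      have hlen0 : 0 < m.length := by omega
      have hhead : PySem.List.pyGetD m 0 [] = m.headD [] := by
        rw [PySem.List.pyGetD_zero]
        cases m with
        | nil => rfl
        | cons a l => rfl
      have hccast : ((c.toNat : Nat) : Int) = c := by omega
      have hpred : (fun row : List String => PySem.List.pyGetD row c "" == "+")
          = (fun row : List String => row.getD c.toNat "" == "+") := by
        funext row
        have h := PySem.List.pyGetD_natCast row c.toNat ""
        rw [hccast] at h
        rw [h]
      have htgt : PySem.List.pyGetD (PySem.List.pyGetD m i []) c "" =
          (m.getD ((m.length : Int) + i).toNat []).getD c.toNat "" := by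
        rw [target_neg m i hlo hneg]
        have h := PySem.List.pyGetD_natCast (m.getD ((m.length : Int) + i).toNat []) c.toNat ""
        rw [hccast] at h
        exact h
      have hcw : c.toNat < (m.headD []).length := by
        have := hcb.2
        rw [hhead] at this
        omega
      have hc1 : m.countP (fun row => row.getD c.toNat "" == "+") ≠ 1 := by
        intro h1
        apply hnd
        refine ⟨hneg, c.toNat, hcw, ?_, h1⟩
        rw [← htgt]
        exact (beq_iff_eq.mp hplus)
      rw [hpred]
      congr 1
      rw [Bool.eq_iff_iff]
      simp only [beq_iff_eq]
      rw [hpred] at hcnt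
      omega
  · simp [hplus]

theorem A_true_of_neg (m : List (List String)) (i : Int)
    (hlo : -(m.length : Int) ≤ i) (hneg : i < 0) (cs : List Int) :
    canA_loop m i cs = true := by
  rw [canA_loop_eq_all]
  apply List.all_eq_true.mpr
  intro c hc
  by_cases hplus : (PySem.List.pyGetD (PySem.List.pyGetD m i []) c "" == "+") = true
  · have hamt := canA_amount_eq' m i c
    have hnint : ¬(0 ≤ i ∧ i < (m.length : Int) ∧
        PySem.List.pyGetD (PySem.List.pyGetD m i []) c "" == "+") := fun h => by omega
    have htm : PySem.List.pyGetD m i [] ∈ m := PySem.List.pyGetD_mem m [] (by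
      constructor <;> omega)
    have hcnt : 0 < m.countP (fun row => PySem.List.pyGetD row c "" == "+") :=
      List.countP_pos_iff.mpr ⟨_, htm, hplus⟩
    have : canA_amount m i c ≠ 0 := by
      unfold canA_amount
      rw [hamt, if_neg hnint]
      omega
    simp [hplus, this]
  · simp [hplus]

theorem B_false_of_D (m : List (List String)) (i : Int)
    (hlo : -(m.length : Int) ≤ i) (hhi : i < (m.length : Int))
    (hd : D_can_be_removed m i) :
    canB_loop (PySem.List.pyGetD m i [])
      (m.foldl (fun d row =>
        (PySem.List.pyRange 0 (((PySem.List.pyGetD m 0 []).length : Int)) 1).foldl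
          (fun d c' => if PySem.List.pyGetD row c' "" == "+" then d.insert c' (d.getD c' 0 + 1) else d) d)
        (PySem.Dict.empty : PySem.Dict Int Int))
      (PySem.List.pyRange 0 (((PySem.List.pyGetD m 0 []).length : Int)) 1) = false := by
  obtain ⟨hneg, cn, hcw, hplus, hcnt1⟩ := hd
  rw [canB_loop_eq_all]
  apply List.all_eq_false.mpr
  have hlen0 : 0 < m.length := by omega
  have hhead : PySem.List.pyGetD m 0 [] = m.headD [] := by
    rw [PySem.List.pyGetD_zero]
    cases m with
    | nil => rfl
    | cons a l => rfl
  refine ⟨(cn : Int), ?_, ?_⟩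
  · rw [PySem.List.mem_pyRange_one, hhead]
    constructor <;> omega
  · have htgt : PySem.List.pyGetD (PySem.List.pyGetD m i []) (cn : Int) "" =
        (m.getD ((m.length : Int) + i).toNat []).getD cn "" := by
      rw [target_neg m i hlo hneg, PySem.List.pyGetD_natCast]
    have hpred : (fun row : List String => PySem.List.pyGetD row (cn : Int) "" == "+")
        = (fun row : List String => row.getD cn "" == "+") := by
      funext row; rw [PySem.List.pyGetD_natCast]
    rw [cov_outer, PySem.Dict.getD_empty, htgt, hplus, hpred]
    have hmem : (cn : Int) ∈ PySem.List.pyRange 0 (((PySem.List.pyGetD m 0 []).length : Int)) 1 := by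
      rw [PySem.List.mem_pyRange_one, hhead]
      constructor <;> omega
    simp [hmem]
    simpa using hcnt1


theorem can_be_removed_spec' (m : List (List String)) (i : Int)
    (hpre : Pre_can_be_removed m i) (hnd : ¬ D_can_be_removed m i) :
    can_be_removed m i = can_be_removed_alt m i := by
  obtain ⟨hne, hrect, hlo, hhi⟩ := hpre
  simp only [can_be_removed, can_be_removed_alt]
  rw [canA_loop_eq_all, canB_loop_eq_all]
  exact all_congr_mem _ _ _ (fun c hc => per_column m i hlo hhi hnd c hc)

-- ===== VERDICT (by name: the statement is the Claim_ definition above) =====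
theorem can_be_removed_spec : Claim_unchanged_can_be_removed := by
  intro m i _hdom hpre hnd
  exact can_be_removed_spec' m i hpre hnd

theorem can_be_removed_changed : Claim_changed_can_be_removed := by
  unfold Claim_changed_can_be_removed; decide

theorem can_be_removed_tight : Claim_exact_can_be_removed := by
  intro m i _hdom hpre hd
  obtain ⟨hne, hrect, hlo, hhi⟩ := hpre
  have hA : can_be_removed m i = true := A_true_of_neg m i hlo hd.1 _
  have hB : can_be_removed_alt m i = false := by
    simp only [can_be_removed_alt]
    exact B_false_of_D m i hlo hhi hd
  rw [hA, hB]
  simp
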